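-- pv_equiv track=rewrite | github.com/davidleexyz/leetcode | 394_rotate_function.py | rotate_function_tle
-- ===== SOURCE A (Python) =====
-- def rotate_function_tle(A):
-- 	if not A:
-- 		return 0
--
-- 	max_res = -float('inf')
-- 	for i in range(len(A)):
-- 		B = A[i:] + A[:i]
-- 		res = 0
-- 		for j in range(len(B)):
-- 			res += j * B[j]
-- 		max_res = max(max_res, res)
-- 	return max_res
-- ===== SOURCE B (Python) =====
-- def rotate_function_tle(A):
--     if not A:
--         return 0
--     n = len(A)
--     S = sum(A)
--     F = sum(j * x for j, x in enumerate(A))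
--     best = F
--     for i in range(n - 1):
--         F += n * A[i] - S
--         if F > best:
--             best = F
--     return best
-- ===== Notes on version B (the rewrite author's own statement) =====
-- stated objective: faster
-- what changed: Instead of materialising every rotation and re-summing it (nested loops), B computes the weighted sum once and updates it in O(1) per rotation via the recurrence F(i+1)=F(i)+n*A[i]-S while tracking the running maximum.
import Mathlib
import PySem

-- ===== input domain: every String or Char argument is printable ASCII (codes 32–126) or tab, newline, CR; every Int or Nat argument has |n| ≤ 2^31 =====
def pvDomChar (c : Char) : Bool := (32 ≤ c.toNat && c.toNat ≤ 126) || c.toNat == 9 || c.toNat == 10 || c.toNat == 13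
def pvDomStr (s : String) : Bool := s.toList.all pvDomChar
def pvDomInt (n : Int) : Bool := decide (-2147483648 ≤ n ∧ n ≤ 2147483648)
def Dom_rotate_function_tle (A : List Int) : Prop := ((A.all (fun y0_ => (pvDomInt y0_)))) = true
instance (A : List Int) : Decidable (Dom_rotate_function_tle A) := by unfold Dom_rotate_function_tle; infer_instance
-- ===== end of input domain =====

-- B replaces A's rotate-and-resum double loop by the incremental recurrence
-- F(i+1) = F(i) + n*A[i] - S with a running maximum (one pass).

-- ===== PORT A =====
-- max_res = -float('inf') is modelled as 'none' (Option Int); n ≥ 1 so the fold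
-- always ends in 'some'.
def rotate_function_tle (A : List Int) : Int :=
  if A = [] then 0
  else
    let n : Int := (A.length : Int)
    let acc := (PySem.List.pyRange 0 n 1).foldl (fun (max_res : Option Int) i =>
      let B := PySem.List.slice A (some i) none ++ PySem.List.slice A none (some i)
      let res := (PySem.List.pyRange 0 (B.length : Int) 1).foldl
        (fun r j => r + j * PySem.List.pyGetD B j 0) 0
      match max_res with
      | none => some res
      | some m => some (max m res)) none
    acc.getD 0

-- ===== PORT B =====
def rotate_function_tle_alt (A : List Int) : Int :=
  if A = [] then 0
  else
    let n : Int := (A.length : Int)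
    let S : Int := A.sum
    let F0 : Int := (PySem.List.enumerate A 0).foldl (fun acc jx => acc + jx.1 * jx.2) 0
    let p := (PySem.List.pyRange 0 (n - 1) 1).foldl (fun (st : Int × Int) i =>
      let F := st.1 + n * PySem.List.pyGetD A i 0 - S
      (F, if F > st.2 then F else st.2)) (F0, F0)
    p.2

-- ===== PRECONDITION & SPEC =====
def Spec_rotate_function_tle (A : List Int) (out : Int) : Prop := out = rotate_function_tle_alt A
instance (A : List Int) (out : Int) : Decidable (Spec_rotate_function_tle A out) := by unfold Spec_rotate_function_tle; infer_instance

-- ===== CLAIM (what is proved, stated in full; the proofs are below) =====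
def Claim_equal_rotate_function_tle : Prop := ∀ (A : List Int), Dom_rotate_function_tle A → Spec_rotate_function_tle A (rotate_function_tle A)

-- ===== LEMMAS AND PROOFS =====

-- wsumFrom t B = Σ_j (t+j) * B[j]; wsum B is the rotation-function value of B.
def wsumFrom : Nat → List Int → Int
  | _, [] => 0
  | t, x :: xs => (t : Int) * x + wsumFrom (t + 1) xs

def wsum (B : List Int) : Int := wsumFrom 0 B

theorem wsumFrom_succ (B : List Int) : ∀ t : Nat, wsumFrom (t + 1) B = wsumFrom t B + B.sum := by
  induction B with
  | nil => intro t; simp [wsumFrom]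
  | cons x xs ih =>
    intro t
    simp [wsumFrom, ih (t + 1)]
    ring

theorem wsum_cons (x : Int) (xs : List Int) : wsum (x :: xs) = wsum xs + xs.sum := by
  simp [wsum, wsumFrom, wsumFrom_succ]

theorem wsumFrom_append_singleton (B : List Int) (x : Int) :
    ∀ t : Nat, wsumFrom t (B ++ [x]) = wsumFrom t B + ((t : Int) + (B.length : Int)) * x := by
  induction B with
  | nil => intro t; simp [wsumFrom]
  | cons y ys ih =>
    intro t
    simp [wsumFrom, ih (t + 1)]
    ring

theorem wsum_append_singleton (B : List Int) (x : Int) :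
    wsum (B ++ [x]) = wsum B + (B.length : Int) * x := by
  simp [wsum, wsumFrom_append_singleton]

-- rot A i: the i-th rotation A[i:] + A[:i]
def rot (A : List Int) (i : Nat) : List Int := A.drop i ++ A.take i

theorem sum_rot (A : List Int) (i : Nat) : (rot A i).sum = A.sum := by
  unfold rot
  rw [List.sum_append, add_comm, ← List.sum_append, List.take_append_drop]

theorem rot_succ (A : List Int) (i : Nat) (hi : i < A.length) :
    rot A (i + 1) = (A.drop (i + 1) ++ A.take i) ++ [A[i]] := by
  have ht : A.take (i + 1) = A.take i ++ [A[i]] := by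
    rw [List.take_add_one, List.getElem?_eq_getElem hi]
    rfl
  unfold rot
  rw [ht, ← List.append_assoc]

theorem drop_cons (A : List Int) (i : Nat) (hi : i < A.length) :
    A.drop i = A[i] :: A.drop (i + 1) := by
  rw [List.drop_eq_getElem_cons hi]

-- the O(1) recurrence B exploits
theorem wsum_rot_succ (A : List Int) (i : Nat) (hi : i < A.length) :
    wsum (rot A (i + 1)) = wsum (rot A i) + (A.length : Int) * A[i] - A.sum := by
  have h1 : rot A i = A[i] :: (A.drop (i + 1) ++ A.take i) := by
    unfold rot
    rw [drop_cons A i hi, List.cons_append]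
  have hlen : (A.drop (i + 1) ++ A.take i).length = A.length - 1 := by
    simp [List.length_drop, List.length_take]
    omega
  have hsum : (A.drop (i + 1) ++ A.take i).sum = A.sum - A[i] := by
    have hs := sum_rot A i
    rw [h1, List.sum_cons] at hs
    omega
  rw [rot_succ A i hi, wsum_append_singleton, hlen, h1, wsum_cons, hsum]
  have : ((A.length - 1 : Nat) : Int) = (A.length : Int) - 1 := by omega
  rw [this]
  ring

-- A's inner loop computes wsum
theorem foldl_range_wsum (B : List Int) :
    ∀ (t : Nat) (c : Int),
      (List.range B.length).foldl (fun (r : Int) (k : Nat) => r + ((k : Int) + (t : Int)) * B.getD k 0) c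
        = c + wsumFrom t B := by
  induction B with
  | nil => intro t c; simp [wsumFrom]
  | cons x xs ih =>
    intro t c
    rw [List.length_cons, List.range_succ_eq_map, List.foldl_cons, List.foldl_map]
    have hstep : ∀ (r : Int) (k : Nat),
        r + ((k.succ : Int) + (t : Int)) * (x :: xs).getD k.succ 0
          = r + ((k : Int) + ((t + 1 : Nat) : Int)) * xs.getD k 0 := by
      intro r k
      simp only [Nat.succ_eq_add_one, List.getD_cons_succ]
      push_cast
      ring
    simp only [hstep]
    rw [ih (t + 1)]
    simp [wsumFrom]
    ring

theorem inner_eq (B : List Int) :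
    (PySem.List.pyRange 0 (B.length : Int) 1).foldl
      (fun r j => r + j * PySem.List.pyGetD B j 0) 0 = wsum B := by
  rw [PySem.List.pyRange_one, List.foldl_map]
  have h0 : ((B.length : Int) - 0).toNat = B.length := by omega
  rw [h0]
  have hstep : ∀ (r : Int) (k : Nat),
      r + (0 + (k : Int)) * PySem.List.pyGetD B (0 + (k : Int)) 0
        = r + ((k : Int) + ((0 : Nat) : Int)) * B.getD k 0 := by
    intro r k
    simp [PySem.List.pyGetD_natCast]
  simp only [hstep]
  rw [foldl_range_wsum B 0 0]
  simp [wsum]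

-- B's initial sum over enumerate computes wsum
theorem enum_eq (A : List Int) :
    ∀ (t : Nat) (c : Int),
      (PySem.List.enumerate A (t : Int)).foldl (fun acc jx => acc + jx.1 * jx.2) c
        = c + wsumFrom t A := by
  induction A with
  | nil => intro t c; simp [PySem.List.enumerate_nil, wsumFrom]
  | cons x xs ih =>
    intro t c
    rw [PySem.List.enumerate_cons]
    have hc : ((t : Int) + 1) = (((t + 1 : Nat)) : Int) := by push_cast; ring
    simp only [List.foldl_cons, hc, ih (t + 1)]
    simp [wsumFrom]
    ring

-- the step of A's running max (max_res starting at -inf modelled as none)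
def optstep (acc : Option Int) (r : Int) : Option Int :=
  match acc with
  | none => some r
  | some m => some (max m r)

theorem optmax_fold (l : List Int) :
    ∀ m : Int, l.foldl optstep (some m) = some (l.foldl max m) := by
  induction l with
  | nil => intro m; rfl
  | cons x xs ih => intro m; simp [List.foldl_cons, optstep, ih]

-- B's fold invariant: state after m steps is (wsum(rot m), running max so far)
theorem bfold_invariant (A : List Int) :
    ∀ m : Nat, m < A.length →
      (List.range m).foldl (fun (st : Int × Int) (i : Nat) =>
          (st.1 + (A.length : Int) * A.getD i 0 - A.sum,
           if st.1 + (A.length : Int) * A.getD i 0 - A.sum > st.2 then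
             st.1 + (A.length : Int) * A.getD i 0 - A.sum
           else st.2)) (wsum (rot A 0), wsum (rot A 0))
        = (wsum (rot A m),
           ((List.range m).map (fun k => wsum (rot A (k + 1)))).foldl max (wsum (rot A 0))) := by
  intro m
  induction m with
  | zero => intro _; simp
  | succ m ih =>
    intro hm
    have hm' : m < A.length := by omega
    rw [List.range_succ, List.foldl_append, ih hm', List.map_append, List.foldl_append]
    simp only [List.foldl_cons, List.foldl_nil, List.map_cons, List.map_nil]
    have hget : A.getD m 0 = A[m] := List.getD_eq_getElem A 0 hm'
    have hF : wsum (rot A m) + (A.length : Int) * A.getD m 0 - A.sum = wsum (rot A (m + 1)) := by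
      rw [hget, ← wsum_rot_succ A m hm']
    rw [hF]
    simp only [Prod.mk.injEq]
    refine ⟨trivial, ?_⟩
    split_ifs with h
    · exact (max_eq_right (le_of_lt h)).symm
    · exact (max_eq_left (not_lt.mp h)).symm

-- range (n+1) as head :: shifted tail
theorem range_succ_shift (n : Nat) :
    List.range (n + 1) = 0 :: (List.range n).map (fun k => k + 1) := by
  rw [List.range_succ_eq_map]

-- ===== VERDICT (by name: the statement is the Claim_ definition above) =====
theorem rotate_function_tle_spec : Claim_equal_rotate_function_tle := by
  intro A _
  unfold Spec_rotate_function_tle rotate_function_tle rotate_function_tle_alt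
  by_cases hA : A = []
  · simp [hA]
  · simp only [if_neg hA]
    obtain ⟨n, hn⟩ : ∃ n, A.length = n + 1 := by
      cases A with
      | nil => exact absurd rfl hA
      | cons x xs => exact ⟨xs.length, rfl⟩
    -- A side: normalise the outer fold to a fold over List.range A.length
    rw [PySem.List.pyRange_one, List.foldl_map]
    have hlenA : ((A.length : Int) - 0).toNat = A.length := by omega
    rw [hlenA]
    -- A's body at index k computes optstep of wsum (rot A k)
    have hbodyA : ∀ (acc : Option Int) (k : Nat),
        (fun (max_res : Option Int) (i : Int) =>
          let B := PySem.List.slice A (some i) none ++ PySem.List.slice A none (some i)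
          let res := (PySem.List.pyRange 0 (B.length : Int) 1).foldl
            (fun r j => r + j * PySem.List.pyGetD B j 0) 0
          match max_res with
          | none => some res
          | some m => some (max m res)) acc (0 + (k : Int))
        = optstep acc (wsum (rot A k)) := by
      intro acc k
      have hz : (0 : Int) + (k : Int) = ((k : Nat) : Int) := by ring
      simp only [hz, PySem.List.slice_from_natCast, PySem.List.slice_to_natCast]
      rw [inner_eq (A.drop k ++ A.take k)]
      rfl
    simp only [hbodyA]
    have hrangeA : List.range A.length = List.range (n + 1) := by rw [hn]
    rw [hrangeA, range_succ_shift, List.foldl_cons, List.foldl_map]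
    rw [show optstep none (wsum (rot A 0)) = some (wsum (rot A 0)) from rfl]
    rw [← List.foldl_map (f := fun k => wsum (rot A (k + 1))) (g := optstep), optmax_fold]
    -- B side
    have he : (PySem.List.enumerate A 0).foldl (fun acc jx => acc + jx.1 * jx.2) 0
        = wsum (rot A 0) := by
      have h := enum_eq A 0 0
      have hr : rot A 0 = A := by simp [rot]
      simpa [wsum, hr] using h
    rw [he]
    rw [PySem.List.pyRange_one, List.foldl_map, List.foldl_map]
    have hlenB : (((A.length : Int) - 1) - 0).toNat = n := by omega
    rw [hlenB]
    have hbodyB : ∀ (st : Int × Int) (k : Nat),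
        (fun (st : Int × Int) (i : Int) =>
          let F := st.1 + (A.length : Int) * PySem.List.pyGetD A i 0 - A.sum
          (F, if F > st.2 then F else st.2)) st (0 + (k : Int))
        = (st.1 + (A.length : Int) * A.getD k 0 - A.sum,
           if st.1 + (A.length : Int) * A.getD k 0 - A.sum > st.2 then
             st.1 + (A.length : Int) * A.getD k 0 - A.sum
           else st.2) := by
      intro st k
      have hz : (0 : Int) + (k : Int) = ((k : Nat) : Int) := by ring
      simp only [hz, PySem.List.pyGetD_natCast]
    simp only [hbodyB]
    rw [bfold_invariant A n (by omega), List.foldl_map]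
    rfl
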